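-- pv_equiv track=rewrite | github.com/ryangillard/misc | leetcode/985_sum_of_even_numbers_after_queries/985_sum_of_even_numbers_after_queries.py | moreIfs
-- ===== SOURCE A (Python) =====
-- def moreIfs(A, queries):
--     current_even_sum = 0
--     for i in range(len(A)):
--         if A[i] % 2 == 0:
--             current_even_sum += A[i]
--
--     answer = [0] * len(queries)
--     for i in range(len(queries)):
--         val = queries[i][0]
--         idx = queries[i][1]
--
--         if A[idx] % 2 == 0:
--             if val % 2 == 0:
--                 current_even_sum += val
--             else:
--                 current_even_sum -= A[idx]
--         else:
--             if val % 2 == 1: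
--                 current_even_sum += A[idx] + val
--
--         A[idx] += val
--
--         answer[i] = current_even_sum
--
--     return answer
-- ===== SOURCE B (Python) =====
-- def moreIfs(A, queries):
--     # Brute force: apply each query to A in place, then rescan A for its even sum.
--     answer = []
--     for q in queries:
--         val, idx = q[0], q[1]
--         A[idx] += val
--         answer.append(sum(x for x in A if x % 2 == 0))
--     return answer
-- ===== Notes on version B (the rewrite author's own statement) =====
-- stated objective: simpler
-- what changed: replaces the incremental even-sum bookkeeping (parity case analysis per query, preallocated answer array) with a plain full rescan of A after each in-place update, appending to a growing answer list
import Mathlib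
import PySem

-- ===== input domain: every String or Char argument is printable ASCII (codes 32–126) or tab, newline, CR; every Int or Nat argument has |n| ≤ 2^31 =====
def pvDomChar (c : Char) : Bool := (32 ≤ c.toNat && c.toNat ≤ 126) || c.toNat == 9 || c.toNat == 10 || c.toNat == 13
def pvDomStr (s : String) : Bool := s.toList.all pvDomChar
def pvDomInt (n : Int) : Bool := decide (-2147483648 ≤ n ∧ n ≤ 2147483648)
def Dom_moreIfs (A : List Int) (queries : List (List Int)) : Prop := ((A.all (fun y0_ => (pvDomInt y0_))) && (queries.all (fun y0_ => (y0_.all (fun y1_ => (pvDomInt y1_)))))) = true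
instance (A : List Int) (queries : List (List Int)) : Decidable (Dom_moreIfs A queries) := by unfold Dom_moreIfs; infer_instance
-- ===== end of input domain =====

-- B replaces A's incremental even-sum bookkeeping by a full rescan of the array after each
-- query (simpler, not faster). Both Pythons mutate the argument A in place identically;
-- the equivalence proved here is about the RETURN value.

-- ===== PORT A =====
-- body of A's query loop (state = (A, current_even_sum, answer), index i)
def stepA (queries : List (List Int)) (st : List Int × Int × List Int) (i : Int) :
    List Int × Int × List Int :=
  let q := PySem.List.pyGetD queries i []
  let val := PySem.List.pyGetD q 0 0
  let idx := PySem.List.pyGetD q 1 0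
  let s :=
    if PySem.List.pyGetD st.1 idx 0 % 2 == 0 then
      (if val % 2 == 0 then st.2.1 + val else st.2.1 - PySem.List.pyGetD st.1 idx 0)
    else
      (if val % 2 == 1 then st.2.1 + PySem.List.pyGetD st.1 idx 0 + val else st.2.1)
  let A' := PySem.List.pySetD st.1 idx (PySem.List.pyGetD st.1 idx 0 + val)
  (A', s, PySem.List.pySetD st.2.2 i s)

def moreIfs (A : List Int) (queries : List (List Int)) : List Int :=
  let ces := (PySem.List.pyRange 0 (PySem.List.len A) 1).foldl
      (fun s i => if PySem.List.pyGetD A i 0 % 2 == 0 then s + PySem.List.pyGetD A i 0 else s) 0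
  let answer := List.replicate queries.length (0 : Int)
  let final := (PySem.List.pyRange 0 (PySem.List.len queries) 1).foldl (stepA queries)
      (A, ces, answer)
  final.2.2

-- ===== PORT B =====
-- sum(x for x in xs if x % 2 == 0)
def pyEvenSum (xs : List Int) : Int := (xs.filter (fun x => x % 2 == 0)).sum

-- body of B's query loop (state = (A, answer))
def stepB (st : List Int × List Int) (q : List Int) : List Int × List Int :=
  let val := PySem.List.pyGetD q 0 0
  let idx := PySem.List.pyGetD q 1 0
  let A' := PySem.List.pySetD st.1 idx (PySem.List.pyGetD st.1 idx 0 + val)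
  (A', st.2 ++ [pyEvenSum A'])

def moreIfs_alt (A : List Int) (queries : List (List Int)) : List Int :=
  (queries.foldl stepB (A, ([] : List Int))).2

-- ===== PRECONDITION & SPEC =====
-- Pre_ excludes exactly the inputs where the Python A raises IndexError: a query with
-- fewer than two entries, or a query index outside [-len(A), len(A)).
def Pre_moreIfs (A : List Int) (queries : List (List Int)) : Prop :=
  ∀ q ∈ queries, 2 ≤ q.length ∧ PySem.Raise.InRange A.length (PySem.List.pyGetD q 1 0)
instance (A : List Int) (queries : List (List Int)) : Decidable (Pre_moreIfs A queries) := by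
  unfold Pre_moreIfs; infer_instance

def pvWitness_moreIfs : List Int × List (List Int) := ([1, 2, 3], [[1, 0], [-3, -2], [4, 1]])

def Spec_moreIfs (A : List Int) (queries : List (List Int)) (out : List Int) : Prop := out = moreIfs_alt A queries
instance (A : List Int) (queries : List (List Int)) (out : List Int) : Decidable (Spec_moreIfs A queries out) := by unfold Spec_moreIfs; infer_instance

-- ===== CLAIM (what is proved, stated in full; the proofs are below) =====
def Claim_equal_moreIfs : Prop := ∀ (A : List Int) (queries : List (List Int)), Dom_moreIfs A queries → Pre_moreIfs A queries → Spec_moreIfs A queries (moreIfs A queries)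

-- ===== LEMMAS AND PROOFS =====

theorem pyEvenSum_cons (a : Int) (t : List Int) :
    pyEvenSum (a :: t) = (if a % 2 == 0 then a else 0) + pyEvenSum t := by
  simp [pyEvenSum, List.filter_cons]
  split_ifs <;> simp

theorem evenSum_foldl (xs : List Int) (s : Int) :
    xs.foldl (fun s a => if a % 2 == 0 then s + a else s) s = s + pyEvenSum xs := by
  induction xs generalizing s with
  | nil => simp [pyEvenSum]
  | cons a t ih =>
    simp only [List.foldl_cons, ih, pyEvenSum_cons]
    split_ifs <;> ring

-- normalized natural index of a Python index under InRange
def natIdx (len : Nat) (i : Int) : Nat := (if i < 0 then i + len else i).toNat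

theorem natIdx_lt {len : Nat} {i : Int} (h : PySem.Raise.InRange len i) :
    natIdx len i < len := by
  unfold PySem.Raise.InRange at h
  unfold natIdx; split <;> omega

theorem pyGetD_inrange (xs : List Int) (i : Int) (d : Int)
    (h : PySem.Raise.InRange xs.length i) :
    PySem.List.pyGetD xs i d = xs.getD (natIdx xs.length i) d := by
  have h' := h; unfold PySem.Raise.InRange at h'
  have hlt : natIdx xs.length i < xs.length := natIdx_lt h
  rw [List.getD_eq_getElem xs d hlt]
  by_cases hi : i < 0
  · have hk : 0 < (-i).toNat := by omega
    have hk2 : (-i).toNat ≤ xs.length := by omega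
    have hieq : i = -((-i).toNat : Int) := by omega
    conv_lhs => rw [hieq]
    rw [PySem.List.pyGetD_neg_natCast xs (-i).toNat d hk hk2]
    congr 1
    unfold natIdx; split <;> omega
  · rw [PySem.List.pyGetD_eq_getElem xs d (by omega) (by omega)]
    congr 1
    unfold natIdx; split <;> omega

theorem pySetD_inrange (xs : List Int) (i : Int) (v : Int)
    (h : PySem.Raise.InRange xs.length i) :
    PySem.List.pySetD xs i v = xs.set (natIdx xs.length i) v := by
  unfold PySem.Raise.InRange at h
  by_cases hi : i < 0
  · unfold PySem.List.pySetD PySem.List.pySet? PySem.List.pyIdx?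
    split_ifs <;> simp_all
    all_goals (try (congr 1; unfold natIdx; split <;> omega))
  · rw [PySem.List.pySetD_of_nonneg xs v (by omega)]
    congr 1
    unfold natIdx; split <;> omega

theorem set_len_append (done : List Int) (x v : Int) (t : List Int) :
    (done ++ x :: t).set done.length v = done ++ v :: t := by
  induction done with
  | nil => simp
  | cons a d ih => simp [ih]

theorem evenSum_set (xs : List Int) (n : Nat) (hn : n < xs.length) (v : Int) :
    pyEvenSum (xs.set n (xs[n] + v)) =
      if xs[n] % 2 == 0 then
        (if v % 2 == 0 then pyEvenSum xs + v else pyEvenSum xs - xs[n])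
      else
        (if v % 2 == 1 then pyEvenSum xs + xs[n] + v else pyEvenSum xs) := by
  induction xs generalizing n with
  | nil => simp at hn
  | cons a t ih =>
    cases n with
    | zero =>
      simp only [List.getElem_cons_zero, List.set_cons_zero, pyEvenSum_cons]
      split_ifs <;> simp_all <;> omega
    | succ m =>
      have hm : m < t.length := by simpa using hn
      simp only [List.getElem_cons_succ, List.set_cons_succ, pyEvenSum_cons, ih m hm]
      split_ifs <;> omega

-- A's loop body as a function of the enumerated pair
def stepA' (st : List Int × Int × List Int) (p : Int × List Int) :
    List Int × Int × List Int :=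
  let val := PySem.List.pyGetD p.2 0 0
  let idx := PySem.List.pyGetD p.2 1 0
  let s :=
    if PySem.List.pyGetD st.1 idx 0 % 2 == 0 then
      (if val % 2 == 0 then st.2.1 + val else st.2.1 - PySem.List.pyGetD st.1 idx 0)
    else
      (if val % 2 == 1 then st.2.1 + PySem.List.pyGetD st.1 idx 0 + val else st.2.1)
  (PySem.List.pySetD st.1 idx (PySem.List.pyGetD st.1 idx 0 + val), s,
    PySem.List.pySetD st.2.2 p.1 s)

theorem bfold_shift (qs : List (List Int)) (Acur acc : List Int) :
    qs.foldl stepB (Acur, acc) =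
      ((qs.foldl stepB (Acur, [])).1, acc ++ (qs.foldl stepB (Acur, [])).2) := by
  induction qs generalizing Acur acc with
  | nil => simp
  | cons q rest ih =>
    simp only [List.foldl_cons]
    rw [ih, ih (stepB (Acur, []) q).1 (stepB (Acur, []) q).2]
    simp [stepB]

theorem main_loop (qs : List (List Int)) (Acur done : List Int)
    (hp : ∀ q ∈ qs, 2 ≤ q.length ∧ PySem.Raise.InRange Acur.length (PySem.List.pyGetD q 1 0)) :
    (PySem.List.enumerate qs (done.length : Int)).foldl stepA'
        (Acur, pyEvenSum Acur, done ++ List.replicate qs.length 0) =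
      ((qs.foldl stepB (Acur, [])).1, pyEvenSum (qs.foldl stepB (Acur, [])).1,
        done ++ (qs.foldl stepB (Acur, [])).2) := by
  induction qs generalizing Acur done with
  | nil => simp [PySem.List.enumerate_nil]
  | cons q rest ih =>
    obtain ⟨hq2, hqr⟩ := hp q (by simp)
    set idx := PySem.List.pyGetD q 1 0 with hidx
    set val := PySem.List.pyGetD q 0 0 with hval
    set j := natIdx Acur.length idx with hj
    have hjl : j < Acur.length := natIdx_lt hqr
    set A' := PySem.List.pySetD Acur idx (PySem.List.pyGetD Acur idx 0 + val) with hA'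
    have hA'eq : A' = Acur.set j (Acur[j]'hjl + val) := by
      rw [hA', pySetD_inrange _ _ _ hqr, pyGetD_inrange _ _ _ hqr,
        List.getD_eq_getElem Acur 0 hjl]
    have hlen : A'.length = Acur.length := by rw [hA'eq]; simp
    have hs : (if PySem.List.pyGetD Acur idx 0 % 2 == 0 then
          (if val % 2 == 0 then pyEvenSum Acur + val else pyEvenSum Acur - PySem.List.pyGetD Acur idx 0)
        else
          (if val % 2 == 1 then pyEvenSum Acur + PySem.List.pyGetD Acur idx 0 + val else pyEvenSum Acur))
        = pyEvenSum A' := by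
      rw [hA'eq, evenSum_set Acur j hjl val, pyGetD_inrange _ _ _ hqr,
        List.getD_eq_getElem Acur 0 hjl]
    rw [PySem.List.enumerate_cons]
    simp only [List.foldl_cons]
    have hset : stepA' (Acur, pyEvenSum Acur, done ++ List.replicate (q :: rest).length 0)
        ((done.length : Int), q) =
        (A', pyEvenSum A', (done ++ [pyEvenSum A']) ++ List.replicate rest.length 0) := by
      simp only [stepA', ← hidx, ← hval, ← hA', hs]
      refine Prod.ext rfl (Prod.ext rfl ?_)
      simp only [List.length_cons, List.replicate_succ]
      rw [PySem.List.pySetD_of_nonneg _ _ (by positivity)]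
      simp only [Int.toNat_natCast, set_len_append]
      simp
    rw [hset]
    have hdl : ((done ++ [pyEvenSum A']).length : Int) = (done.length : Int) + 1 := by
      simp
    rw [← hdl, ih A' (done ++ [pyEvenSum A'])
      (by intro p hp'; have := hp p (by simp [hp']); rwa [hlen])]
    have hq1 : stepB (Acur, ([] : List Int)) q = (A', [pyEvenSum A']) := by
      simp [stepB, ← hA', ← hval, ← hidx]
    rw [hq1, bfold_shift rest A' [pyEvenSum A']]
    simp

-- ===== VERDICT (by name: the statement is the Claim_ definition above) =====
theorem moreIfs_spec : Claim_equal_moreIfs := by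
  intro A queries _ hpre
  unfold Spec_moreIfs moreIfs moreIfs_alt
  simp only [PySem.List.len_eq]
  rw [PySem.List.foldl_pyRange_zero_pyGetD' A 0
      (fun s a => if a % 2 == 0 then s + a else s) 0]
  rw [evenSum_foldl, zero_add]
  have hmain := main_loop queries A [] (by intro q hq; exact hpre q hq)
  simp only [List.length_nil, Nat.cast_zero, List.nil_append] at hmain
  rw [PySem.List.enumerate_eq_map_pyRange queries [], PySem.List.len_eq,
    List.foldl_map] at hmain
  have hfun : (fun (x : List Int × Int × List Int) (y : Int) =>
      stepA' x (y, PySem.List.pyGetD queries y [])) = stepA queries := rfl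
  rw [hfun] at hmain
  rw [hmain]
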